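-- pv_equiv track=rewrite | github.com/anthonymakarewicz/volatility-trading | src/volatility_trading/etl/orats/api/_client_helpers.py | orats_list_param
-- ===== SOURCE A (Python) =====
-- from collections.abc import Iterable, Mapping, Sequence
--
-- def orats_list_param(values: Iterable[str] | None) -> str | None:
--     """Normalize list-like ORATS params into a comma-separated string."""
--     if values is None:
--         return None
--
--     out: list[str] = []
--     seen: set[str] = set()
--     for v in values:
--         if v is None:
--             continue
--         s = str(v).strip()
--         if not s or s in seen:
--             continue
--         out.append(s)
--         seen.add(s)
--
--     return ",".join(out) if out else None
-- ===== SOURCE B (Python) =====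
-- def orats_list_param(values):
--     """Normalize list-like ORATS params into a comma-separated string."""
--     if values is None:
--         return None
--     pending = [str(v).strip() for v in values if v is not None]
--     out = []
--     while pending:
--         head, rest = pending[0], pending[1:]
--         if head:
--             out.append(head)
--             pending = [x for x in rest if x != head]
--         else:
--             pending = rest
--     return ",".join(out) if out else None
-- ===== Notes on version B (the rewrite author's own statement) =====
-- stated objective: alternative
-- what changed: Replaced A's single pass with an auxiliary seen-set by a deletion-based dedup: repeatedly take the first pending normalized string and filter all its later duplicates out of the remainder, so no membership structure is maintained at all.
import Mathlib
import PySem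

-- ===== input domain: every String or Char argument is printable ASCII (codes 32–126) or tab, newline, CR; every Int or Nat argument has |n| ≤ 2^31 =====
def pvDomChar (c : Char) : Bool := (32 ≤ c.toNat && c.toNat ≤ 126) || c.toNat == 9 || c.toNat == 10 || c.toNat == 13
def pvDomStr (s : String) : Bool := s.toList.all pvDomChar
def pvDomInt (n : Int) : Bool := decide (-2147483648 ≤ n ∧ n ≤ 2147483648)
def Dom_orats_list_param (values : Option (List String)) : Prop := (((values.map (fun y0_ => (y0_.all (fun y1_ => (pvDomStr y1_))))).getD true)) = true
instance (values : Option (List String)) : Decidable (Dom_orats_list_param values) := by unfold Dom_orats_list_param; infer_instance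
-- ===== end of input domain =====

-- B dedups by deleting later duplicates from the remainder (take head, filter it out of the rest) instead of A's single pass with a seen-set; alternative decomposition, same results.


-- ===== PORT A =====
-- one loop step of A: skip None/empty/already-seen strings, else append to out and record in seen
def oratsStepA (st : List String × PySem.Set String) (v : String) : List String × PySem.Set String :=
  let s := PySem.Str.strip v
  if s = "" ∨ PySem.Set.contains st.2 s then st
  else (st.1 ++ [s], PySem.Set.add st.2 s)

def orats_list_param (values : Option (List String)) : Option String :=
  match values with
  | none => none
  | some vs =>
    let st := vs.foldl oratsStepA ([], PySem.Set.empty)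
    if st.1 ≠ [] then some (PySem.Str.join "," st.1) else none

-- ===== PORT B =====
-- B's while-loop as tail recursion on the pending list: take the first pending string; if
-- nonempty keep it and delete all its later occurrences from the rest, else just drop it
def oratsDD : List String → List String
  | [] => []
  | head :: rest =>
    if head = "" then oratsDD rest
    else head :: oratsDD (rest.filter (fun x => x != head))
termination_by l => l.length
decreasing_by
  · simp
  · simp only [List.length_unattach]
    exact Nat.lt_succ_of_le (le_trans (List.length_filter_le _ _) (le_of_eq List.length_attach))

def orats_list_param_alt (values : Option (List String)) : Option String :=
  match values with
  | none => none
  | some vs =>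
    let out := oratsDD (vs.map PySem.Str.strip)
    if out ≠ [] then some (PySem.Str.join "," out) else none

-- ===== PRECONDITION & SPEC =====
def Spec_orats_list_param (values : Option (List String)) (out : Option String) : Prop := out = orats_list_param_alt values
instance (values : Option (List String)) (out : Option String) : Decidable (Spec_orats_list_param values out) := by unfold Spec_orats_list_param; infer_instance

-- ===== CLAIM (what is proved, stated in full; the proofs are below) =====
def Claim_equal_orats_list_param : Prop := ∀ (values : Option (List String)), Dom_orats_list_param values → Spec_orats_list_param values (orats_list_param values)

-- ===== LEMMAS AND PROOFS =====
-- restricting a filter by one more forbidden element = filtering the result by (≠ s)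
theorem orats_filter_step (l acc : List String) (s : String) :
    l.filter (fun x => !(acc ++ [s]).contains x)
      = (l.filter (fun x => !acc.contains x)).filter (fun x => x != s) := by
  rw [List.filter_filter]
  apply List.filter_congr
  intro x _
  simp only [List.contains_append, Bool.not_or, List.contains_cons, List.contains_nil,
    Bool.or_false, bne, Bool.and_comm]

theorem oratsDD_cons_ne (s : String) (l : List String) (hs : s ≠ "") :
    oratsDD (s :: l) = s :: oratsDD (l.filter (fun x => x != s)) := by
  rw [oratsDD]; simp [hs]

theorem oratsDD_cons_empty (l : List String) :
    oratsDD ("" :: l) = oratsDD l := by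
  rw [oratsDD]; simp

-- A's loop from state (acc, acc) with "" ∉ acc appends exactly B's deletion-dedup of the
-- stripped strings that are not already in acc
theorem oratsA_loop (vs : List String) (acc : List String) (hne : "" ∉ acc) :
    vs.foldl oratsStepA (acc, acc)
      = (acc ++ oratsDD ((vs.map PySem.Str.strip).filter (fun s => !acc.contains s)),
         acc ++ oratsDD ((vs.map PySem.Str.strip).filter (fun s => !acc.contains s))) := by
  induction vs generalizing acc with
  | nil => simp [oratsDD]
  | cons v vs ih =>
    simp only [List.foldl_cons, List.map_cons]
    by_cases hs : PySem.Str.strip v = ""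
    · have hstep : oratsStepA (acc, acc) v = (acc, acc) := by
        simp [oratsStepA, hs]
      have hcb' : (!acc.contains "") = true := by simpa using hne
      rw [hstep, ih acc hne]
      simp only [List.filter_cons, hs, hcb', if_true, oratsDD_cons_empty]
    · by_cases hmem : PySem.Str.strip v ∈ acc
      · have hcb : (!acc.contains (PySem.Str.strip v)) = false := by simpa using hmem
        have hsc : PySem.Set.contains acc (PySem.Str.strip v) := (PySem.Set.contains_iff _ _).mpr hmem
        have hstep : oratsStepA (acc, acc) v = (acc, acc) := by
          simp only [oratsStepA, hsc, or_true, if_pos]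
        rw [hstep, ih acc hne]
        simp only [List.filter_cons, hcb, Bool.false_eq_true, if_false]
      · have hcb : (!acc.contains (PySem.Str.strip v)) = true := by simpa using hmem
        have hstep : oratsStepA (acc, acc) v
            = (acc ++ [PySem.Str.strip v], acc ++ [PySem.Str.strip v]) := by
          simp [oratsStepA, hs, hmem]
        have hne' : "" ∉ acc ++ [PySem.Str.strip v] := by
          simp only [List.mem_append, List.mem_singleton]
          rintro (h | h)
          · exact hne h
          · exact hs h.symm
        rw [hstep, ih _ hne', orats_filter_step]
        simp only [List.filter_cons, hcb, if_true, oratsDD_cons_ne _ _ hs]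
        simp

-- ===== VERDICT (by name: the statement is the Claim_ definition above) =====
theorem orats_list_param_spec : Claim_equal_orats_list_param := by
  intro values _
  unfold Spec_orats_list_param orats_list_param orats_list_param_alt
  cases values with
  | none => rfl
  | some vs =>
    simp only
    have h0 : (PySem.Set.empty : PySem.Set String) = ([] : List String) := rfl
    rw [h0, oratsA_loop vs [] (by simp)]
    simp
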